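-- pv_equiv track=rewrite | github.com/DeliciousBuding/MCMICM | develop-problem-C/src/dwts_model/engines/cp_rank.py | find_feasible_fan_ranks
-- ===== SOURCE A (Python) =====
-- from typing import Dict, List, Tuple, Optional, Set
-- from itertools import permutations
--
-- def find_feasible_fan_ranks(
--
--     judge_ranks: Dict[str, int],
--     eliminated: str,
--     survivors: Set[str],
-- ) -> List[Dict[str, int]]:
--     """
--     枚举所有可行的粉丝排名。
--
--     Returns: 满足淘汰一致性的粉丝排名列表
--     """
--     contestants = [eliminated] + list(survivors)
--     n = len(contestants)
--
--     valid_rankings = []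
--     for perm in permutations(range(1, n + 1)):
--         fan_ranks = dict(zip(contestants, perm))
--         e_total = fan_ranks[eliminated] + judge_ranks.get(eliminated, n)
--
--         is_valid = True
--         for s in survivors:
--             s_total = fan_ranks[s] + judge_ranks.get(s, 1)
--             if e_total <= s_total:
--                 is_valid = False
--                 break
--
--         if is_valid:
--             valid_rankings.append(fan_ranks)
--
--     return valid_rankings
-- ===== SOURCE B (Python) =====
-- def find_feasible_fan_ranks(judge_ranks, eliminated, survivors):
--     contestants = [eliminated] + list(survivors)
--     n = len(contestants)
--     e_judge = judge_ranks.get(eliminated, n)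
--     results = []
--     used = set()
--     ranks = {}
--
--     def assign(i):
--         if i == n:
--             results.append(dict(ranks))
--             return
--         c = contestants[i]
--         for v in range(1, n + 1):
--             if v in used:
--                 continue
--             if i > 0 and ranks[eliminated] + e_judge <= v + judge_ranks.get(c, 1):
--                 continue
--             used.add(v)
--             ranks[c] = v
--             assign(i + 1)
--             del ranks[c]
--             used.remove(v)
--
--     assign(0)
--     return results
-- ===== Notes on version B (the rewrite author's own statement) =====
-- stated objective: alternative
-- what changed: Replaces A's generate-and-test over all n! permutations with a recursive depth-first backtracking search that assigns rank values in increasing order and prunes a branch as soon as the eliminated-vs-survivor consistency check fails, producing the same rankings in the same order.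
-- outside the precondition, e.g. on find_feasible_fan_ranks({}, 'a', {'a'}): A returns [{'a': 2}, {'a': 1}], B raises KeyError
import Mathlib
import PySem

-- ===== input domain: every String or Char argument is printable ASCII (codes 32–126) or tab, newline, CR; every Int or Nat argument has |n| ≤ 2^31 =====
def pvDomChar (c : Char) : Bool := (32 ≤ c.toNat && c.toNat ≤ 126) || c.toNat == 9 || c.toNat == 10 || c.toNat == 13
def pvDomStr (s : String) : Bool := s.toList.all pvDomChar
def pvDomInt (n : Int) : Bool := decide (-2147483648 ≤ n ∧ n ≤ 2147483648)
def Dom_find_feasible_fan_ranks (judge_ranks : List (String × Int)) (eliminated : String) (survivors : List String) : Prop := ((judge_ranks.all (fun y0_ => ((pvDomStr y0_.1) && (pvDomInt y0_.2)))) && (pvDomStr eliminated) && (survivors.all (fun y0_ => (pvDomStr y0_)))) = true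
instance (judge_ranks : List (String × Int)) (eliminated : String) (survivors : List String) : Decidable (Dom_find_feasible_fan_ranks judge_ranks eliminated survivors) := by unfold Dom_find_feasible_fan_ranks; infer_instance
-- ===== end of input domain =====

-- B replaces A's generate-and-test over all n! permutations by a depth-first backtracking
-- search that assigns rank values in increasing order and prunes a branch as soon as the
-- eliminated-vs-survivor consistency check fails (objective: alternative; same worst case).

-- ===== PORT A =====
-- A's inner `for s in survivors: … break` loop setting is_valid.
-- fan_ranks[s] is ported as getD s 0: every survivor is a key of fan_ranks (zip covers all
-- contestants), so the Python KeyError branch is unreachable and the default is never used.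
def pvCheckA (e_total : Int) (jd : PySem.Dict String Int) (fan : PySem.Dict String Int) : List String → Bool
  | [] => true
  | s :: rest =>
    if e_total ≤ fan.getD s 0 + jd.getD s 1 then false else pvCheckA e_total jd fan rest

-- itertools.permutations(range(1, n+1)) is PySem.List.permutations vals vals.length.
def find_feasible_fan_ranks (judge_ranks : List (String × Int)) (eliminated : String) (survivors : List String) : List (List (String × Int)) :=
  let jd := PySem.Dict.mk judge_ranks
  let contestants := eliminated :: survivors
  let n := contestants.length
  let vals := PySem.List.pyRange 1 ((n : Int) + 1) 1
  (PySem.List.permutations vals vals.length).foldl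
    (fun acc perm =>
      let fan := (contestants.zip perm).foldl (fun d kv => d.insert kv.1 kv.2) (PySem.Dict.mk [])
      let e_total := fan.getD eliminated 0 + jd.getD eliminated (n : Int)
      if pvCheckA e_total jd fan survivors then acc ++ [fan.items] else acc)
    []

-- ===== PORT B =====
-- Source B's recursive assign(i): recursion over the suffix of `contestants` still to rank;
-- `first` is Source B's `i > 0` test (the head of contestants is the eliminated one).
-- ranks[eliminated] is ported as getD eliminated 0: once first = false, eliminated has been
-- assigned (Python's KeyError is reachable only when eliminated ∈ survivors, outside Pre_).
def pvAssignB (jd : PySem.Dict String Int) (eliminated : String) (e_judge : Int) (vals : List Int) :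
    List String → Bool → List Int → PySem.Dict String Int → List (List (String × Int))
  | [], _, _, ranks => [ranks.items]
  | c :: rest, first, used, ranks =>
    vals.foldl
      (fun acc v =>
        if used.contains v then acc
        else if !first && decide (ranks.getD eliminated 0 + e_judge ≤ v + jd.getD c 1) then acc
        else acc ++ pvAssignB jd eliminated e_judge vals rest false (used ++ [v]) (ranks.insert c v))
      []

def find_feasible_fan_ranks_alt (judge_ranks : List (String × Int)) (eliminated : String) (survivors : List String) : List (List (String × Int)) :=
  let jd := PySem.Dict.mk judge_ranks
  let contestants := eliminated :: survivors
  let n := contestants.length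
  let e_judge := jd.getD eliminated (n : Int)
  pvAssignB jd eliminated e_judge (PySem.List.pyRange 1 ((n : Int) + 1) 1) contestants true [] (PySem.Dict.mk [])

-- ===== PRECONDITION & SPEC =====
-- survivors is a Python set not containing eliminated: Pre_ requires its list of elements to be
-- duplicate-free and to exclude eliminated.  When eliminated ∈ survivors the contestants list has
-- a duplicate key, A's dict-overwrite ranking is accidental (a non-permutation) and B raises
-- KeyError there, so exactly those inputs are excluded.
def Pre_find_feasible_fan_ranks (judge_ranks : List (String × Int)) (eliminated : String) (survivors : List String) : Prop :=
  survivors.Nodup ∧ eliminated ∉ survivors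
instance (judge_ranks : List (String × Int)) (eliminated : String) (survivors : List String) : Decidable (Pre_find_feasible_fan_ranks judge_ranks eliminated survivors) := by unfold Pre_find_feasible_fan_ranks; infer_instance

def pvWitness_find_feasible_fan_ranks : (List (String × Int)) × String × List String :=
  ([("a", 1), ("b", 2)], "a", ["b", "c"])

def Spec_find_feasible_fan_ranks (judge_ranks : List (String × Int)) (eliminated : String) (survivors : List String) (out : List (List (String × Int))) : Prop := out = find_feasible_fan_ranks_alt judge_ranks eliminated survivors
instance (judge_ranks : List (String × Int)) (eliminated : String) (survivors : List String) (out : List (List (String × Int))) : Decidable (Spec_find_feasible_fan_ranks judge_ranks eliminated survivors out) := by unfold Spec_find_feasible_fan_ranks; infer_instance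

-- ===== CLAIM (what is proved, stated in full; the proofs are below) =====
def Claim_equal_find_feasible_fan_ranks : Prop := ∀ (judge_ranks : List (String × Int)) (eliminated : String) (survivors : List String), Dom_find_feasible_fan_ranks judge_ranks eliminated survivors → Pre_find_feasible_fan_ranks judge_ranks eliminated survivors → Spec_find_feasible_fan_ranks judge_ranks eliminated survivors (find_feasible_fan_ranks judge_ranks eliminated survivors)

-- ===== LEMMAS AND PROOFS =====

-- fold of inserts of an association list (both ports build fan_ranks this way)
def pvInsL (d : PySem.Dict String Int) (l : List (String × Int)) : PySem.Dict String Int :=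
  l.foldl (fun d kv => d.insert kv.1 kv.2) d

-- the validity test expressed on the (survivor, rank) pairs of one permutation
def pvCheckZ (et : Int) (jd : PySem.Dict String Int) : List (String × Int) → Bool
  | [] => true
  | (c, v) :: rest => if et ≤ v + jd.getD c 1 then false else pvCheckZ et jd rest

theorem pvInsL_getD_notkey (l : List (String × Int)) (d : PySem.Dict String Int) (k : String)
    (dflt : Int) (h : k ∉ l.map Prod.fst) : (pvInsL d l).getD k dflt = d.getD k dflt := by
  induction l generalizing d with
  | nil => rfl
  | cons kv rest ih =>
    simp only [List.map_cons, List.mem_cons, not_or] at h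
    rw [show pvInsL d (kv :: rest) = pvInsL (d.insert kv.1 kv.2) rest from rfl]
    rw [ih _ h.2, PySem.Dict.getD_insert_of_ne _ _ _ h.1]

theorem pvInsL_getD_key (l : List (String × Int)) (d : PySem.Dict String Int) (k : String)
    (v : Int) (hnd : (l.map Prod.fst).Nodup) (hm : (k, v) ∈ l) :
    (pvInsL d l).getD k 0 = v := by
  induction l generalizing d with
  | nil => simp at hm
  | cons kv rest ih =>
    simp only [List.map_cons, List.nodup_cons] at hnd
    rcases List.mem_cons.mp hm with h | h
    · subst h
      rw [show pvInsL d ((k, v) :: rest) = pvInsL (d.insert k v) rest from rfl]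
      rw [pvInsL_getD_notkey _ _ _ _ hnd.1, PySem.Dict.getD_insert_self]
    · rw [show pvInsL d (kv :: rest) = pvInsL (d.insert kv.1 kv.2) rest from rfl]
      exact ih _ hnd.2 h

theorem pvCheckA_eq_checkZ (et : Int) (jd fan : PySem.Dict String Int) :
    ∀ (cs : List String) (p : List Int), p.length = cs.length →
    (∀ c v, (c, v) ∈ cs.zip p → fan.getD c 0 = v) →
    pvCheckA et jd fan cs = pvCheckZ et jd (cs.zip p) := by
  intro cs
  induction cs with
  | nil => intro p _ _; rfl
  | cons c rest ih =>
    intro p hlen hget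
    cases p with
    | nil => simp at hlen
    | cons v q =>
      simp only [List.zip_cons_cons, pvCheckA, pvCheckZ]
      rw [hget c v (by simp)]
      split_ifs with h
      · rfl
      · exact ih q (by simpa using hlen) (fun c' v' hm => hget c' v' (by simp [hm]))

-- one unfolding step of PySem.List.permutations on a duplicate-free list, as a choice of
-- the leading VALUE (rather than of its index)
def pvIdxBody {β : Type} (G : Int → List Int → List β) (xs : List Int) (i : Nat) : List β :=
  match xs[i]? with
  | none => []
  | some y => G y (xs.eraseIdx i)

theorem pvFlatMap_idx {β : Type} (xs : List Int) (G : Int → List Int → List β) (hnd : xs.Nodup) :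
    (List.range xs.length).flatMap (pvIdxBody G xs) = xs.flatMap (fun x => G x (xs.erase x)) := by
  induction xs generalizing G with
  | nil => rfl
  | cons x rest ih =>
    simp only [List.nodup_cons] at hnd
    rw [List.length_cons, List.range_succ_eq_map, List.flatMap_cons, List.flatMap_map,
      List.flatMap_cons]
    have herase : (x :: rest).erase x = rest := by simp
    rw [herase]
    congr 1
    have hstep : ∀ i, pvIdxBody G (x :: rest) (i + 1) = pvIdxBody (fun y l => G y (x :: l)) rest i := by
      intro i
      unfold pvIdxBody
      rw [List.getElem?_cons_succ]
      cases rest[i]? <;> simp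
    simp only [hstep]
    rw [ih (fun y l => G y (x :: l)) hnd.2]
    apply List.flatMap_congr
    intro y hy
    have hyx : y ≠ x := fun h => hnd.1 (h ▸ hy)
    rw [List.erase_cons_tail (by simpa using Ne.symm hyx)]

theorem pvPermutations_succ (xs : List Int) (hnd : xs.Nodup) (r : Nat) :
    PySem.List.permutations xs (r + 1) =
      xs.flatMap (fun x => (PySem.List.permutations (xs.erase x) r).map (x :: ·)) := by
  simp only [PySem.List.permutations]
  refine (List.flatMap_congr ?_).trans
    (pvFlatMap_idx xs (fun x l => (PySem.List.permutations l r).map (x :: ·)) hnd)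
  intro i hi
  have hi' : i < xs.length := List.mem_range.mp hi
  unfold pvIdxBody
  rw [List.getElem?_eq_getElem hi']

-- the backtracking phase over the survivors equals filtered enumeration of the remaining values
theorem pvAssignB_eq (jd : PySem.Dict String Int) (e : String) (ej : Int) (vals : List Int)
    (hvn : vals.Nodup) :
    ∀ (cs : List String) (used : List Int) (ranks : PySem.Dict String Int),
      e ∉ cs →
      (vals.filter (fun v => !used.contains v)).length = cs.length →
      pvAssignB jd e ej vals cs false used ranks =
        (PySem.List.permutations (vals.filter (fun v => !used.contains v))
            (vals.filter (fun v => !used.contains v)).length).flatMap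
          (fun p => if pvCheckZ (ranks.getD e 0 + ej) jd (cs.zip p) then
              [(pvInsL ranks (cs.zip p)).items] else []) := by
  intro cs
  induction cs with
  | nil =>
    intro used ranks _ hlen
    rw [List.length_eq_zero_iff.mp hlen]
    simp [pvAssignB, pvCheckZ, pvInsL]
  | cons c rest ih =>
    intro used ranks he hlen
    have hec : e ≠ c := fun h => he (h ▸ List.mem_cons_self ..)
    have herest : e ∉ rest := fun h => he (List.mem_cons_of_mem _ h)
    have havn : (vals.filter (fun v => !used.contains v)).Nodup := hvn.filter _
    -- left side: fold over vals skipping used = fold over the filtered list, as a flatMap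
    have h1 : pvAssignB jd e ej vals (c :: rest) false used ranks =
        (vals.filter (fun v => !used.contains v)).flatMap
          (fun v => if decide (ranks.getD e 0 + ej ≤ v + jd.getD c 1) then []
            else pvAssignB jd e ej vals rest false (used ++ [v]) (ranks.insert c v)) := by
      rw [show pvAssignB jd e ej vals (c :: rest) false used ranks =
          vals.foldl (fun acc v =>
            if used.contains v then acc
            else if !false && decide (ranks.getD e 0 + ej ≤ v + jd.getD c 1) then acc
            else acc ++ pvAssignB jd e ej vals rest false (used ++ [v]) (ranks.insert c v)) []
          from rfl]
      rw [show (fun (acc : List (List (String × Int))) v =>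
            if used.contains v then acc
            else if !false && decide (ranks.getD e 0 + ej ≤ v + jd.getD c 1) then acc
            else acc ++ pvAssignB jd e ej vals rest false (used ++ [v]) (ranks.insert c v))
          = (fun acc v => if (!used.contains v) = true then
              acc ++ (if decide (ranks.getD e 0 + ej ≤ v + jd.getD c 1) then []
                else pvAssignB jd e ej vals rest false (used ++ [v]) (ranks.insert c v))
              else acc) from by
        funext acc v
        cases hc : used.contains v <;>
          cases hp : decide (ranks.getD e 0 + ej ≤ v + jd.getD c 1) <;> simp [hc, hp]]
      rw [← List.foldl_filter, PySem.List.foldl_append_eq_flatMap]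
      simp
    rw [h1, hlen, List.length_cons, pvPermutations_succ _ havn, List.flatMap_assoc]
    apply List.flatMap_congr
    intro v hv
    have hvmem : v ∈ vals.filter (fun v => !used.contains v) := hv
    have hvin : v ∈ vals := (List.mem_filter.mp hv).1
    have hvnu : (!used.contains v) = true := (List.mem_filter.mp hv).2
    have hfe : vals.filter (fun x => !(used ++ [v]).contains x)
        = (vals.filter (fun v => !used.contains v)).erase v := by
      rw [havn.erase_eq_filter v, List.filter_filter]
      apply List.filter_congr
      intro x _
      rw [List.contains_append]
      cases h1 : used.contains x <;> cases h2 : x == v <;>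
        simp only [h1, h2, List.contains_cons, List.contains_nil, Bool.or_false, Bool.false_or,
          Bool.or_true, Bool.true_or, Bool.not_true, Bool.not_false, Bool.and_true,
          Bool.and_false, Bool.true_and, Bool.false_and, bne]
    have hlen' : (vals.filter (fun x => !(used ++ [v]).contains x)).length = rest.length := by
      rw [hfe, List.length_erase_of_mem hvmem, hlen, List.length_cons]
      omega
    rw [List.flatMap_map]
    by_cases hle : ranks.getD e 0 + ej ≤ v + jd.getD c 1
    · rw [if_pos (by simpa using hle)]
      symm
      apply List.flatMap_eq_nil_iff.mpr
      intro p _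
      simp only [List.zip_cons_cons, pvCheckZ]
      rw [if_pos hle]
      simp
    · rw [if_neg (by simpa using hle)]
      rw [ih (used ++ [v]) (ranks.insert c v) herest hlen', hlen', hfe]
      apply List.flatMap_congr
      intro p _
      rw [show (ranks.insert c v).getD e 0 = ranks.getD e 0 from
        PySem.Dict.getD_insert_of_ne _ _ _ hec]
      simp only [List.zip_cons_cons, pvCheckZ]
      rw [if_neg hle]
      rfl

-- ===== VERDICT (by name: the statement is the Claim_ definition above) =====
-- map-after-filter as a flatMap (the shape PySem.List.foldl_append_if produces vs. the one
-- pvAssignB_eq produces)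
theorem pvMapFilter {α β : Type} (p : α → Bool) (f : α → β) (l : List α) :
    (l.filter p).map f = l.flatMap (fun x => if p x then [f x] else []) := by
  induction l with
  | nil => rfl
  | cons x rest ih =>
    cases hx : p x <;> simp [hx, ih]

theorem pvMain (judge_ranks : List (String × Int)) (eliminated : String)
    (survivors : List String) (hnd : survivors.Nodup) (he : eliminated ∉ survivors) :
    find_feasible_fan_ranks judge_ranks eliminated survivors
      = find_feasible_fan_ranks_alt judge_ranks eliminated survivors := by
  simp only [find_feasible_fan_ranks, find_feasible_fan_ranks_alt]
  set jd := PySem.Dict.mk judge_ranks with hjd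
  set vals := PySem.List.pyRange 1 (((eliminated :: survivors).length : Int) + 1) 1 with hvals
  set ej := jd.getD eliminated ((eliminated :: survivors).length : Int) with hej
  have hvn : vals.Nodup := PySem.List.nodup_pyRange_one _ _
  have hvl : vals.length = survivors.length + 1 := by
    rw [hvals, PySem.List.length_pyRange_one]
    simp
  -- B side: one unfolding of pvAssignB (first = true, used = [])
  have hB : pvAssignB jd eliminated ej vals (eliminated :: survivors) true [] (PySem.Dict.mk [])
      = vals.flatMap (fun v =>
          pvAssignB jd eliminated ej vals survivors false [v] ((PySem.Dict.mk []).insert eliminated v)) := by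
    rw [show pvAssignB jd eliminated ej vals (eliminated :: survivors) true [] (PySem.Dict.mk [])
        = vals.foldl (fun acc v =>
            if ([] : List Int).contains v then acc
            else if !true && decide ((PySem.Dict.mk ([] : List (String × Int))).getD eliminated 0 + ej ≤ v + jd.getD eliminated 1) then acc
            else acc ++ pvAssignB jd eliminated ej vals survivors false ([] ++ [v]) ((PySem.Dict.mk []).insert eliminated v)) []
        from rfl]
    simp only [List.contains_nil, Bool.false_eq_true, if_false, Bool.not_true,
      Bool.false_and, List.nil_append]
    rw [PySem.List.foldl_append_eq_flatMap, List.nil_append]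
  -- A side: fold as flatMap, then split the head of every permutation
  rw [PySem.List.foldl_append_if, List.nil_append, pvMapFilter, hvl,
    pvPermutations_succ _ hvn, List.flatMap_assoc, hB]
  apply List.flatMap_congr
  intro v hvin
  have hfe : vals.filter (fun x => !([v] : List Int).contains x) = vals.erase v := by
    rw [hvn.erase_eq_filter v]
    apply List.filter_congr
    intro x _
    cases h2 : x == v <;>
      simp only [h2, List.contains_cons, List.contains_nil, Bool.or_false, Bool.not_true,
        Bool.not_false, bne]
  have hlen' : (vals.filter (fun x => !([v] : List Int).contains x)).length = survivors.length := by
    rw [hfe, List.length_erase_of_mem hvin, hvl]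
    omega
  rw [List.flatMap_map,
    pvAssignB_eq jd eliminated ej vals hvn survivors [v] _ he hlen', hlen', hfe,
    PySem.Dict.getD_insert_self]
  apply List.flatMap_congr
  intro p hp
  have herl : (vals.erase v).length = survivors.length := by
    rw [List.length_erase_of_mem hvin, hvl]
    omega
  have hplen : p.length = survivors.length := by
    rw [← herl] at hp
    have hperm := PySem.List.perm_of_mem_permutations hp
    rw [hperm.length_eq, herl]
  have hkeys : (survivors.zip p).map Prod.fst = survivors :=
    List.map_fst_zip (by omega)
  have hnd' : ((survivors.zip p).map Prod.fst).Nodup := by rw [hkeys]; exact hnd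
  have he' : eliminated ∉ (survivors.zip p).map Prod.fst := by rw [hkeys]; exact he
  have hfan : ∀ c' v', (c', v') ∈ survivors.zip p →
      (pvInsL ((PySem.Dict.mk []).insert eliminated v) (survivors.zip p)).getD c' 0 = v' := by
    intro c' v' hm
    exact pvInsL_getD_key _ _ _ _ hnd' hm
  have hgete : (pvInsL ((PySem.Dict.mk []).insert eliminated v) (survivors.zip p)).getD eliminated 0 = v := by
    rw [pvInsL_getD_notkey _ _ _ _ he', PySem.Dict.getD_insert_self]
  rw [show ((eliminated :: survivors).zip (v :: p)).foldl
        (fun d kv => d.insert kv.1 kv.2) (PySem.Dict.mk [])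
      = pvInsL ((PySem.Dict.mk []).insert eliminated v) (survivors.zip p) from rfl]
  rw [hgete,
    pvCheckA_eq_checkZ _ jd _ survivors p hplen hfan]

-- ===== VERDICT (by name: the statement is the Claim_ definition above) =====
theorem find_feasible_fan_ranks_spec : Claim_equal_find_feasible_fan_ranks := by
  intro judge_ranks eliminated survivors _ hpre
  exact pvMain judge_ranks eliminated survivors hpre.1 hpre.2
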